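-- pv_equiv track=rewrite | github.com/homedepot/flow | flow/coderepo/github/github.py | _verify_tags_found
-- ===== SOURCE A (Python) =====
-- def _verify_tags_found(tag_list, need_snapshot, need_release, need_tag, need_base):
--     found_snapshot = 0
--     found_release = 0
--     found_tag = need_tag is None
--
--     for name, _ in tag_list:
--         if need_snapshot > found_snapshot:
--             if '+' in name:
--                 found_snapshot += 1
--         if need_release > found_release:
--             if '+' not in name:
--                 found_release += 1
--         if not found_tag:
--             if need_base:
--                 if name.split("+")[0] == need_tag:
--                     found_tag = True
--             elif name == need_tag:
--                 found_tag = True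
--         if found_snapshot >= need_snapshot and found_release >= need_release and found_tag:
--             return True
--     return False
-- ===== SOURCE B (Python) =====
-- def _verify_tags_found(tag_list, need_snapshot, need_release, need_tag, need_base):
--     snapshots = sum(1 for name, _ in tag_list if '+' in name)
--     releases = len(tag_list) - snapshots
--     if need_tag is None:
--         found_tag = True
--     elif need_base:
--         found_tag = any(name.split('+')[0] == need_tag for name, _ in tag_list)
--     else:
--         found_tag = any(name == need_tag for name, _ in tag_list)
--     return snapshots >= need_snapshot and releases >= need_release and found_tag
-- ===== Notes on version B (the rewrite author's own statement) =====
-- stated objective: simpler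
-- what changed: Replaced A's single stateful loop with capped counters and an in-loop early-return check by three independent whole-list passes (count snapshots, derive releases from the length, any() for the tag) combined in one final boolean.
-- intended difference: On an empty tag_list with need_snapshot <= 0, need_release <= 0 and need_tag None, A returns False because its success check only runs inside the loop, while B returns True, the intended value since every requirement is already satisfied. — e.g. on _verify_tags_found([], 0, 0, none, false): A returns false, B returns true
import Mathlib
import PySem

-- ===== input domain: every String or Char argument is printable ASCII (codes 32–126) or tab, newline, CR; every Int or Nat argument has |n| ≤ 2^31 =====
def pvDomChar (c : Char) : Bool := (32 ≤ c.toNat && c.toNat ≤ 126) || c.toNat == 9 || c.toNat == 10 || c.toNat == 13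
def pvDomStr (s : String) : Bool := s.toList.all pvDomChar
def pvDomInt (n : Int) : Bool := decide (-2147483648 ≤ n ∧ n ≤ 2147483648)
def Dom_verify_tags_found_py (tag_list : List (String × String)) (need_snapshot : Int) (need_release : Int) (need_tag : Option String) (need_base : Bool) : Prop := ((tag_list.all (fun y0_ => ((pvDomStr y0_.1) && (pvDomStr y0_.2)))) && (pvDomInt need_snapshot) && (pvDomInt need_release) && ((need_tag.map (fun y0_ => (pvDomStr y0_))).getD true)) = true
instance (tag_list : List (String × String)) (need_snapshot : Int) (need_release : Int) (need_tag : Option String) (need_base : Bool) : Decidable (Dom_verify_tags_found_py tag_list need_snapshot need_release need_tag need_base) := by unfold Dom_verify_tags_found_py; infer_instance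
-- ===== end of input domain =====

-- B replaces A's stateful early-return loop by three independent whole-list passes (objective: simpler).

-- shared helper: name.split("+")[0]  ("+"≠"" so split? is some nonempty; defaults unreachable)
def splitBase (name : String) : String :=
  (((PySem.Str.split? name "+").getD [name]).headD name)

-- ===== PORT A =====
def verify_tags_found_py_go (ns nr : Int) (nt : Option String) (nb : Bool) :
    List (String × String) → Int → Int → Bool → Bool
  | [], _, _, _ => false
  | (name, _) :: rest, fs, fr, ft =>
    let fs := if ns > fs then (if PySem.Str.isIn "+" name then fs + 1 else fs) else fs
    let fr := if nr > fr then (if !(PySem.Str.isIn "+" name) then fr + 1 else fr) else fr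
    let ft := if !ft then
        (if nb then (if some (splitBase name) == nt then true else ft)
         else (if some name == nt then true else ft))
      else ft
    if fs ≥ ns && fr ≥ nr && ft then true
    else verify_tags_found_py_go ns nr nt nb rest fs fr ft

def verify_tags_found_py (tag_list : List (String × String)) (need_snapshot : Int) (need_release : Int) (need_tag : Option String) (need_base : Bool) : Bool :=
  verify_tags_found_py_go need_snapshot need_release need_tag need_base tag_list 0 0 need_tag.isNone

-- ===== PORT B =====
def verify_tags_found_py_alt (tag_list : List (String × String)) (need_snapshot : Int) (need_release : Int) (need_tag : Option String) (need_base : Bool) : Bool :=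
  let snapshots : Int := (tag_list.countP (fun p => PySem.Str.isIn "+" p.1) : Int)
  let releases : Int := (tag_list.length : Int) - snapshots
  let found_tag : Bool :=
    match need_tag with
    | none => true
    | some t =>
      if need_base then tag_list.any (fun p => splitBase p.1 == t)
      else tag_list.any (fun p => p.1 == t)
  decide (snapshots ≥ need_snapshot) && decide (releases ≥ need_release) && found_tag

-- ===== PRECONDITION & SPEC =====
-- On an empty tag_list with need_snapshot ≤ 0, need_release ≤ 0 and need_tag None, A returns False
-- (its success check only runs inside the loop) while B returns True, the intended value since
-- every requirement is already satisfied.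
def D_verify_tags_found_py (tag_list : List (String × String)) (need_snapshot : Int) (need_release : Int) (need_tag : Option String) (need_base : Bool) : Prop :=
  tag_list = [] ∧ need_snapshot ≤ 0 ∧ need_release ≤ 0 ∧ need_tag = none
instance (tag_list : List (String × String)) (need_snapshot : Int) (need_release : Int) (need_tag : Option String) (need_base : Bool) : Decidable (D_verify_tags_found_py tag_list need_snapshot need_release need_tag need_base) := by unfold D_verify_tags_found_py; infer_instance

def Spec_verify_tags_found_py (tag_list : List (String × String)) (need_snapshot : Int) (need_release : Int) (need_tag : Option String) (need_base : Bool) (out : Bool) : Prop := ¬ D_verify_tags_found_py tag_list need_snapshot need_release need_tag need_base → out = verify_tags_found_py_alt tag_list need_snapshot need_release need_tag need_base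
instance (tag_list : List (String × String)) (need_snapshot : Int) (need_release : Int) (need_tag : Option String) (need_base : Bool) (out : Bool) : Decidable (Spec_verify_tags_found_py tag_list need_snapshot need_release need_tag need_base out) := by unfold Spec_verify_tags_found_py; infer_instance

def pvDiffWitness_verify_tags_found_py : (List (String × String)) × Int × Int × Option String × Bool := ([], 0, 0, none, false)
def pvDiffWitnessOut_verify_tags_found_py : Bool × Bool := (false, true)

-- ===== CLAIM (what is proved, stated in full; the proofs are below) =====
def Claim_unchanged_verify_tags_found_py : Prop := ∀ (tag_list : List (String × String)) (need_snapshot : Int) (need_release : Int) (need_tag : Option String) (need_base : Bool), Dom_verify_tags_found_py tag_list need_snapshot need_release need_tag need_base → Spec_verify_tags_found_py tag_list need_snapshot need_release need_tag need_base (verify_tags_found_py tag_list need_snapshot need_release need_tag need_base)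
def Claim_changed_verify_tags_found_py : Prop := Dom_verify_tags_found_py (pvDiffWitness_verify_tags_found_py.1) (pvDiffWitness_verify_tags_found_py.2.1) (pvDiffWitness_verify_tags_found_py.2.2.1) (pvDiffWitness_verify_tags_found_py.2.2.2.1) (pvDiffWitness_verify_tags_found_py.2.2.2.2) ∧ D_verify_tags_found_py (pvDiffWitness_verify_tags_found_py.1) (pvDiffWitness_verify_tags_found_py.2.1) (pvDiffWitness_verify_tags_found_py.2.2.1) (pvDiffWitness_verify_tags_found_py.2.2.2.1) (pvDiffWitness_verify_tags_found_py.2.2.2.2) ∧ verify_tags_found_py (pvDiffWitness_verify_tags_found_py.1) (pvDiffWitness_verify_tags_found_py.2.1) (pvDiffWitness_verify_tags_found_py.2.2.1) (pvDiffWitness_verify_tags_found_py.2.2.2.1) (pvDiffWitness_verify_tags_found_py.2.2.2.2) = pvDiffWitnessOut_verify_tags_found_py.1 ∧ verify_tags_found_py_alt (pvDiffWitness_verify_tags_found_py.1) (pvDiffWitness_verify_tags_found_py.2.1) (pvDiffWitness_verify_tags_found_py.2.2.1) (pvDiffWitness_verify_tags_found_py.2.2.2.1) (pvDiffWitness_verify_tags_found_py.2.2.2.2)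 = pvDiffWitnessOut_verify_tags_found_py.2 ∧ pvDiffWitnessOut_verify_tags_found_py.1 ≠ pvDiffWitnessOut_verify_tags_found_py.2
def Claim_exact_verify_tags_found_py : Prop := ∀ (tag_list : List (String × String)) (need_snapshot : Int) (need_release : Int) (need_tag : Option String) (need_base : Bool), Dom_verify_tags_found_py tag_list need_snapshot need_release need_tag need_base → D_verify_tags_found_py tag_list need_snapshot need_release need_tag need_base → verify_tags_found_py tag_list need_snapshot need_release need_tag need_base ≠ verify_tags_found_py_alt tag_list need_snapshot need_release need_tag need_base

-- ===== LEMMAS AND PROOFS =====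

-- the per-name tag match A tests
def vtfMatch (nt : Option String) (nb : Bool) (p : String × String) : Bool :=
  if nb then some (splitBase p.1) == nt else some p.1 == nt

-- A's loop returns true iff the list is nonempty and the totals over the whole list meet the needs
theorem go_eq (ns nr : Int) (nt : Option String) (nb : Bool) :
    ∀ (l : List (String × String)) (fs fr : Int) (ft : Bool),
    verify_tags_found_py_go ns nr nt nb l fs fr ft =
      (!l.isEmpty
        && decide (fs + (l.countP (fun p => PySem.Chars.isIn ['+'] p.1.toList) : Int) ≥ ns)
        && decide (fr + (l.countP (fun p => !(PySem.Chars.isIn ['+'] p.1.toList)) : Int) ≥ nr)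
        && (ft || l.any (vtfMatch nt nb))) := by
  intro l
  induction l with
  | nil => intro fs fr ft; simp [verify_tags_found_py_go]
  | cons x rest ih =>
    intro fs fr ft
    obtain ⟨name, v⟩ := x
    rw [verify_tags_found_py_go]
    have hft' : (if !ft then (if nb then (if some (splitBase name) == nt then true else ft) else (if some name == nt then true else ft)) else ft) = (ft || vtfMatch nt nb (name, v)) := by
      cases ft
      · cases nb
        · cases h : (some name == nt) <;> simp [vtfMatch, h]
        · cases h : (some (splitBase name) == nt) <;> simp [vtfMatch, h]
      · simp [vtfMatch]
    simp only [hft', ih]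
    rw [Bool.eq_iff_iff]
    simp only [Bool.and_eq_true, Bool.or_eq_true, decide_eq_true_eq, List.countP_cons,
      List.any_cons, List.isEmpty_cons, Bool.not_false, Bool.true_and,]
    by_cases hp : PySem.Str.isIn "+" name = true <;>
      simp only [hp, Bool.not_true, Bool.not_false, if_true] <;>
      by_cases hrest : rest = [] <;>
      simp_all <;> split_ifs <;> (try simp_all) <;> (try omega) <;>
      (by_cases hT : ft = true ∨ vtfMatch nt nb (name, v) = true <;>
       by_cases hR : ∃ a b, (a, b) ∈ rest ∧ vtfMatch nt nb (a, b) = true <;>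
       simp [hT, hR] <;> omega)

-- release count: the non-'+' count equals length minus the '+' count
theorem countP_not_eq {α : Type} (q : α → Bool) (l : List α) :
    (l.countP (fun x => !(q x)) : Int) =
      (l.length : Int) - (l.countP q : Int) := by
  induction l with
  | nil => simp
  | cons x t ih =>
    simp only [List.countP_cons, List.length_cons]
    by_cases h : q x = true <;> simp only [h] <;> push_cast <;> simp <;> omega

-- ===== VERDICT (by name: the statement is the Claim_ definition above) =====
theorem verify_tags_found_py_spec : Claim_unchanged_verify_tags_found_py := by
  intro tag_list ns nr nt nb _ hD
  unfold verify_tags_found_py verify_tags_found_py_alt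
  rw [go_eq, countP_not_eq]
  cases tag_list with
  | nil =>
    simp only [D_verify_tags_found_py, not_and_or] at hD
    cases nt with
    | none =>
      simp only [List.countP_nil, List.any_nil] at *
      simp_all
      omega
    | some t => simp
  | cons x rest =>
    simp only [List.isEmpty_cons, Bool.not_false, Bool.true_and, Int.zero_add]
    cases nt with
    | none => simp
    | some t =>
      simp only [Option.isNone_some, Bool.false_or]
      have hmf : (vtfMatch (some t) false) = (fun p : String × String => p.1 == t) := by
        funext p; simp [vtfMatch]
      have hmt : (vtfMatch (some t) true) = (fun p : String × String => splitBase p.1 == t) := by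
        funext p; simp [vtfMatch]
      cases nb <;> simp [hmf, hmt]

theorem verify_tags_found_py_changed : Claim_changed_verify_tags_found_py := by
  unfold Claim_changed_verify_tags_found_py; decide

theorem verify_tags_found_py_tight : Claim_exact_verify_tags_found_py := by
  intro tag_list ns nr nt nb _ hD
  obtain ⟨h1, h2, h3, h4⟩ := hD
  subst h1 h4
  unfold verify_tags_found_py verify_tags_found_py_alt verify_tags_found_py_go
  simp
  omega
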